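-- pv_equiv track=rewrite | github.com/leo-cb/datascience | Stocks scraping/functions.py | FindSupport
-- ===== SOURCE A (Python) =====
-- def FindSupport(lows,offset,start):
--     """
--     Finds nearest support with offset 'offset' and starting from 'start' index
--     """
--
--     isThisSupport = bool()
--
--     for i in range(offset+start,len(lows)-offset):
--         isThisSupport = True
--         supportIndex = i
--
--         for j in range(start,offset):
--             if lows[i] > lows[i+j] or lows[i] > lows[i-j]:
--                 isThisSupport = False
--                 break
--
--         if isThisSupport:
--             break
--
--     if isThisSupport:
--         return (supportIndex,lows[supportIndex])
--     else:
--         return (None,None)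
-- ===== SOURCE B (Python) =====
-- def FindSupport(lows, offset, start):
--     """
--     Finds nearest support with offset 'offset' and starting from 'start' index
--     """
--     n = len(lows)
--     lo = offset + start
--     hi = n - offset
--     if lo >= hi:
--         return (None, None)
--     w = offset - start
--     if w <= 0:
--         # inner comparison band is empty: the first candidate is a support
--         return (lo, lows[lo])
--     # sparse table of doubling window minima: level[a] = min(lows[a : a + 2**k])
--     K = 0
--     while (1 << (K + 1)) <= w:
--         K += 1
--     level = list(lows)
--     for k in range(K):
--         step = 1 << k
--         level = [min(level[a], level[a + step]) for a in range(len(level) - step)]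
--     step = 1 << K
--
--     def wmin(a):
--         # min(lows[a : a + w]) in O(1), since 2**K <= w <= 2**(K+1)
--         return min(level[a], level[a + w - step])
--
--     for i in range(lo, hi):
--         if lows[i] <= wmin(i + start) and lows[i] <= wmin(i - offset + 1):
--             return (i, lows[i])
--     return (None, None)
-- ===== Notes on version B (the rewrite author's own statement) =====
-- stated objective: alternative
-- what changed: B builds a doubling sparse table of window minima once and tests each candidate index with two O(1) range-minimum comparisons, replacing A's per-candidate inner rescan of the offset-window; Pre_ keeps the natural domain (non-negative offset/start, plus the sign-independent corners of an empty candidate range or an empty comparison band with an in-wrap-range first candidate, where the programs agree) and excludes the remaining negative offset/start inputs, where A raises IndexError or its value rests on Python negative-index wraparound inside the comparison band.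
-- outside the precondition, e.g. on FindSupport([2, 1, -4, -3, 4, 2, -3, 0], 0, -3): A returns (-2, -3), B returns (2, -4); on FindSupport([-4, -2, 0, 4, 0, 1, -1, 2], 4, -3): A returns (None, None), B returns (1, -2)
import Mathlib
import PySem

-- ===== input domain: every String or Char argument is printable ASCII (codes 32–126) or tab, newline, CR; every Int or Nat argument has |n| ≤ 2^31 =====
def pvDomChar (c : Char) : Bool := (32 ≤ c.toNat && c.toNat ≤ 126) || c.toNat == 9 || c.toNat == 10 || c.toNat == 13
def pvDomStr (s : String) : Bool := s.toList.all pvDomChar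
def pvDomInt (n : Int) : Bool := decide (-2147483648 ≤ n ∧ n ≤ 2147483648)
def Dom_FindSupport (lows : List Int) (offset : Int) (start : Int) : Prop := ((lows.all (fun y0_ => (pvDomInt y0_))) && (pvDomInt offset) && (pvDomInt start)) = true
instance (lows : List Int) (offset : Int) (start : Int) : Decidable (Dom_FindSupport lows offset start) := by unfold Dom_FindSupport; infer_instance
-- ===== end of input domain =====

-- B replaces A's per-candidate rescan of the offset-window by a sparse table of window minima
-- built once (doubling), then two O(1) range-min comparisons per candidate (objective: alternative).

-- shared index helper: Python's lows[i] (total form; every access is in range under Pre_)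
def pvGet (xs : List Int) (i : Int) : Int := PySem.List.pyGetD xs i 0

-- ===== PORT A =====
-- inner 'for j in range(start, offset)' with its break: returns the final isThisSupport flag
def aInner (lows : List Int) (i : Int) : List Int → Bool
  | [] => true
  | j :: js =>
    if pvGet lows i > pvGet lows (i + j) || pvGet lows i > pvGet lows (i - j) then false
    else aInner lows i js

-- outer 'for i in range(offset+start, len(lows)-offset)' with its break: first supporting i
def aLoop (lows : List Int) (start : Int) (offset : Int) : List Int → Option Int
  | [] => none
  | i :: is =>
    if aInner lows i (PySem.List.pyRange start offset 1) then some i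
    else aLoop lows start offset is

def FindSupport (lows : List Int) (offset : Int) (start : Int) : Option Int × Option Int :=
  match aLoop lows start offset
      (PySem.List.pyRange (offset + start) ((lows.length : Int) - offset) 1) with
  | some i => (some i, some (pvGet lows i))
  | none => (none, none)

-- ===== PORT B =====
-- while (1 << (K+1)) <= w: K += 1  (fuel = w.toNat only makes the loop structurally total;
-- it never runs out before the loop condition fails)
def bCalcKAux (w : Int) : Nat → Nat → Nat
  | 0, K => K
  | fuel + 1, K => if 2 ^ (K + 1) ≤ w then bCalcKAux w fuel (K + 1) else K

def bCalcK (w : Int) (K : Nat) : Nat := bCalcKAux w w.toNat K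

-- the k-th sparse-table level: level[a] = min(lows[a : a + 2^k])
def bBuild (lows : List Int) : Nat → List Int
  | 0 => lows
  | k + 1 =>
    let lv := bBuild lows k
    let step : Int := 2 ^ k
    (PySem.List.pyRange 0 ((lv.length : Int) - step) 1).map
      (fun a => min (pvGet lv a) (pvGet lv (a + step)))

-- wmin(a) = min(lows[a : a + w]) via two overlapping power-of-two windows
def bWmin (level : List Int) (w : Int) (step : Int) (a : Int) : Int :=
  min (pvGet level a) (pvGet level (a + w - step))

-- 'for i in range(lo, hi)' with its early return
def bLoop (lows level : List Int) (w step offset start : Int) : List Int → Option Int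
  | [] => none
  | i :: is =>
    if pvGet lows i ≤ bWmin level w step (i + start) ∧
       pvGet lows i ≤ bWmin level w step (i - offset + 1) then some i
    else bLoop lows level w step offset start is

def FindSupport_alt (lows : List Int) (offset : Int) (start : Int) : Option Int × Option Int :=
  let n : Int := lows.length
  let lo := offset + start
  let hi := n - offset
  if hi ≤ lo then (none, none)
  else if offset - start ≤ 0 then (some lo, some (pvGet lows lo))
  else
    let w := offset - start
    let K := bCalcK w 0
    let level := bBuild lows K
    let step : Int := 2 ^ K
    match bLoop lows level w step offset start (PySem.List.pyRange lo hi 1) with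
    | some i => (some i, some (pvGet lows i))
    | none => (none, none)

-- ===== PRECONDITION & SPEC =====
-- Pre_ keeps the natural domain (non-negative offset and start) plus the two corners whose value
-- does not depend on signs: an empty candidate range (both return (None, None)) and an empty
-- comparison band whose first candidate index is in Python's wrap range (both return it at once);
-- it excludes the remaining negative offset/start inputs, where A either raises IndexError or its
-- value rests on Python's negative-index wraparound inside the comparison band, outside the
-- function's natural domain of indices and window widths.
def Pre_FindSupport (lows : List Int) (offset : Int) (start : Int) : Prop :=
  (0 ≤ offset ∧ 0 ≤ start) ∨ ((lows.length : Int) - offset ≤ offset + start) ∨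
  (offset - start ≤ 0 ∧ -(lows.length : Int) ≤ offset + start ∧
    offset + start < (lows.length : Int))
instance (lows : List Int) (offset : Int) (start : Int) : Decidable (Pre_FindSupport lows offset start) := by
  unfold Pre_FindSupport; infer_instance

def pvWitness_FindSupport : List Int × Int × Int := ([3, 1, 2, 1, 4], 1, 0)

def Spec_FindSupport (lows : List Int) (offset : Int) (start : Int) (out : Option Int × Option Int) : Prop := out = FindSupport_alt lows offset start
instance (lows : List Int) (offset : Int) (start : Int) (out : Option Int × Option Int) : Decidable (Spec_FindSupport lows offset start out) := by unfold Spec_FindSupport; infer_instance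

-- ===== CLAIM (what is proved, stated in full; the proofs are below) =====
def Claim_equal_FindSupport : Prop := ∀ (lows : List Int) (offset : Int) (start : Int), Dom_FindSupport lows offset start → Pre_FindSupport lows offset start → Spec_FindSupport lows offset start (FindSupport lows offset start)

-- ===== LEMMAS AND PROOFS =====

-- A's inner loop returns true iff i is a support over its comparison band
theorem aInner_iff (lows : List Int) (i : Int) (js : List Int) :
    aInner lows i js = true ↔
      ∀ j ∈ js, pvGet lows i ≤ pvGet lows (i + j) ∧ pvGet lows i ≤ pvGet lows (i - j) := by
  induction js with
  | nil => simp [aInner]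
  | cons j js ih =>
    simp only [aInner]
    split_ifs with h <;> simp only [decide_eq_true_eq, Bool.or_eq_true] at h
    · simp only [false_iff]
      intro hall
      have := hall j (List.mem_cons_self)
      omega
    · push Not at h
      simp only [ih, List.forall_mem_cons]
      exact ⟨fun hall => ⟨h, hall⟩, fun hall => hall.2⟩

-- both scan loops return the same first index when the per-candidate tests agree
theorem loops_eq (lows level : List Int) (w step offset start : Int) (is : List Int)
    (h : ∀ i ∈ is,
      (pvGet lows i ≤ bWmin level w step (i + start) ∧
       pvGet lows i ≤ bWmin level w step (i - offset + 1)) ↔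
      aInner lows i (PySem.List.pyRange start offset 1) = true) :
    bLoop lows level w step offset start is = aLoop lows start offset is := by
  induction is with
  | nil => rfl
  | cons i is ih =>
    simp only [bLoop, aLoop]
    by_cases hc : aInner lows i (PySem.List.pyRange start offset 1) = true
    · rw [if_pos ((h i List.mem_cons_self).mpr hc), if_pos hc]
    · rw [if_neg (fun hh => hc ((h i List.mem_cons_self).mp hh)), if_neg hc,
        ih (fun i hi => h i (List.mem_cons_of_mem _ hi))]

theorem bBuild_length (lows : List Int) (k : Nat) (hk : 2 ^ k ≤ lows.length) :
    (bBuild lows k).length = lows.length + 1 - 2 ^ k := by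
  induction k with
  | zero => simp [bBuild]
  | succ k ih =>
    have h2 : (2:Nat) ^ (k + 1) = 2 ^ k + 2 ^ k := by ring
    have hk' : 2 ^ k ≤ lows.length := by omega
    simp only [bBuild, List.length_map, PySem.List.length_pyRange_one]
    rw [ih hk']
    have e1 : ((2:Nat) ^ k : Int) = (2:Int) ^ k := by push_cast; ring
    have e2 : (2:Int) ^ (k + 1) = 2 ^ k + 2 ^ k := by ring
    omega

theorem bBuild_succ_get (lows : List Int) (k : Nat) (a : Int) (ha : 0 ≤ a)
    (hn : a + 2 ^ (k + 1) ≤ (lows.length : Int)) :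
    pvGet (bBuild lows (k + 1)) a
      = min (pvGet (bBuild lows k) a) (pvGet (bBuild lows k) (a + 2 ^ k)) := by
  have e1 : ((2:Nat) ^ k : Int) = (2:Int) ^ k := by push_cast; ring
  have e2 : (2:Int) ^ (k + 1) = 2 ^ k + 2 ^ k := by ring
  have hpos : (0:Int) < 2 ^ k := by positivity
  have hk : (2:Nat) ^ k ≤ lows.length := by omega
  have hL := bBuild_length lows k hk
  simp only [bBuild]
  unfold pvGet
  rw [PySem.List.pyGetD_map_pyRange_of_nonneg _ _ _ _ ha (by rw [hL]; omega)]

theorem bBuild_le (lows : List Int) (k : Nat) (a t : Int)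
    (ha : 0 ≤ a) (ht0 : 0 ≤ t) (ht : t < 2 ^ k) (hn : a + 2 ^ k ≤ (lows.length : Int)) :
    pvGet (bBuild lows k) a ≤ pvGet lows (a + t) := by
  induction k generalizing a t with
  | zero =>
    have : t = 0 := by omega
    subst this
    simp [bBuild]
  | succ k ih =>
    have e2 : (2:Int) ^ (k + 1) = 2 ^ k + 2 ^ k := by ring
    have hpos : (0:Int) < 2 ^ k := by positivity
    rw [bBuild_succ_get lows k a ha hn]
    rcases lt_or_ge t (2 ^ k) with hlt | hge
    · exact le_trans (min_le_left _ _) (ih a t ha ht0 hlt (by omega))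
    · have : a + 2 ^ k + (t - 2 ^ k) = a + t := by ring
      calc _ ≤ pvGet (bBuild lows k) (a + 2 ^ k) := min_le_right _ _
        _ ≤ pvGet lows (a + 2 ^ k + (t - 2 ^ k)) := ih (a + 2 ^ k) (t - 2 ^ k) (by omega) (by omega) (by omega) (by omega)
        _ = pvGet lows (a + t) := by rw [this]

theorem bBuild_ex (lows : List Int) (k : Nat) (a : Int)
    (ha : 0 ≤ a) (hn : a + 2 ^ k ≤ (lows.length : Int)) :
    ∃ t, 0 ≤ t ∧ t < 2 ^ k ∧ pvGet (bBuild lows k) a = pvGet lows (a + t) := by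
  induction k generalizing a with
  | zero => exact ⟨0, le_refl _, by norm_num, by simp [bBuild]⟩
  | succ k ih =>
    have e2 : (2:Int) ^ (k + 1) = 2 ^ k + 2 ^ k := by ring
    have hpos : (0:Int) < 2 ^ k := by positivity
    rw [bBuild_succ_get lows k a ha hn]
    obtain ⟨t1, h10, h11, h1e⟩ := ih a ha (by omega)
    obtain ⟨t2, h20, h21, h2e⟩ := ih (a + 2 ^ k) (by omega) (by omega)
    rcases min_choice (pvGet (bBuild lows k) a) (pvGet (bBuild lows k) (a + 2 ^ k)) with hm | hm
    · exact ⟨t1, h10, by omega, by rw [hm, h1e]⟩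
    · refine ⟨2 ^ k + t2, by omega, by omega, ?_⟩
      rw [hm, h2e]
      ring_nf
  -- the two levels cover [a, a + 2^(k+1)) and the minimum is attained in one of them

theorem bCalcKAux_spec (w : Int) (fuel K : Nat) (hK : 2 ^ K ≤ w) (hfuel : w.toNat ≤ K + fuel) :
    2 ^ (bCalcKAux w fuel K) ≤ w ∧ w < 2 ^ (bCalcKAux w fuel K + 1) := by
  induction fuel generalizing K with
  | zero =>
    have h2 : (K + 1 : Nat) < 2 ^ (K + 1) := Nat.lt_two_pow_self
    have h3 : ((K : Int) + 1) < (2 : Int) ^ (K + 1) := by exact_mod_cast h2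
    exact ⟨hK, by simp only [bCalcKAux]; omega⟩
  | succ fuel ih =>
    simp only [bCalcKAux]
    split_ifs with h
    · exact ih (K + 1) h (by omega)
    · exact ⟨hK, by omega⟩

theorem bCalcK_spec (w : Int) (K : Nat) (hK : 2 ^ K ≤ w) :
    2 ^ (bCalcK w K) ≤ w ∧ w < 2 ^ (bCalcK w K + 1) :=
  bCalcKAux_spec w w.toNat K hK (by omega)

-- x ≤ wmin(a) iff x is below every element of the width-w window at a
theorem bWmin_spec (lows : List Int) (K : Nat) (w a x : Int)
    (hw1 : 2 ^ K ≤ w) (hw2 : w ≤ 2 ^ (K + 1)) (ha : 0 ≤ a)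
    (hn : a + w ≤ (lows.length : Int)) :
    x ≤ bWmin (bBuild lows K) w (2 ^ K) a ↔ ∀ t, 0 ≤ t → t < w → x ≤ pvGet lows (a + t) := by
  have e2 : (2:Int) ^ (K + 1) = 2 ^ K + 2 ^ K := by ring
  have hpos : (0:Int) < 2 ^ K := by positivity
  unfold bWmin
  constructor
  · intro hx t ht0 htw
    rcases lt_or_ge t (2 ^ K) with hlt | hge
    · exact le_trans (le_trans hx (min_le_left _ _))
        (bBuild_le lows K a t ha ht0 hlt (by omega))
    · have heq : a + w - 2 ^ K + (t - (w - 2 ^ K)) = a + t := by ring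
      have := bBuild_le lows K (a + w - 2 ^ K) (t - (w - 2 ^ K))
        (by omega) (by omega) (by omega) (by omega)
      rw [heq] at this
      exact le_trans (le_trans hx (min_le_right _ _)) this
  · intro hall
    obtain ⟨t1, h10, h11, h1e⟩ := bBuild_ex lows K a ha (by omega)
    obtain ⟨t2, h20, h21, h2e⟩ := bBuild_ex lows K (a + w - 2 ^ K) (by omega) (by omega)
    refine le_min ?_ ?_
    · rw [h1e]; exact hall t1 h10 (by omega)
    · rw [h2e]
      have heq : a + w - 2 ^ K + t2 = a + (w - 2 ^ K + t2) := by ring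
      rw [heq]
      exact hall (w - 2 ^ K + t2) (by omega) (by omega)

-- B's O(1) test equals A's inner-loop verdict at every candidate i
theorem cond_iff (lows : List Int) (offset start i : Int) (K : Nat)
    (h0 : 0 ≤ start) (_hw : 0 < offset - start)
    (hK1 : 2 ^ K ≤ offset - start) (hK2 : offset - start ≤ 2 ^ (K + 1))
    (hi1 : offset + start ≤ i) (hi2 : i < (lows.length : Int) - offset) :
    (pvGet lows i ≤ bWmin (bBuild lows K) (offset - start) (2 ^ K) (i + start) ∧
     pvGet lows i ≤ bWmin (bBuild lows K) (offset - start) (2 ^ K) (i - offset + 1)) ↔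
    aInner lows i (PySem.List.pyRange start offset 1) = true := by
  rw [aInner_iff,
    bWmin_spec lows K (offset - start) (i + start) (pvGet lows i) hK1 hK2 (by omega) (by omega),
    bWmin_spec lows K (offset - start) (i - offset + 1) (pvGet lows i) hK1 hK2 (by omega) (by omega)]
  constructor
  · rintro ⟨h1, h2⟩ j hj
    rw [PySem.List.mem_pyRange_one] at hj
    constructor
    · have := h1 (j - start) (by omega) (by omega)
      rwa [show i + start + (j - start) = i + j by ring] at this
    · have := h2 (offset - 1 - j) (by omega) (by omega)
      rwa [show i - offset + 1 + (offset - 1 - j) = i - j by ring] at this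
  · intro hall
    constructor <;> intro t ht0 htw
    · have := (hall (start + t) (by rw [PySem.List.mem_pyRange_one]; omega)).1
      rwa [show i + (start + t) = i + start + t by ring] at this
    · have := (hall (offset - 1 - t) (by rw [PySem.List.mem_pyRange_one]; omega)).2
      rwa [show i - (offset - 1 - t) = i - offset + 1 + t by ring] at this

-- ===== VERDICT (by name: the statement is the Claim_ definition above) =====
theorem FindSupport_spec : Claim_equal_FindSupport := by
  intro lows offset start _ hpre
  unfold Spec_FindSupport FindSupport FindSupport_alt
  simp only []
  by_cases hempty : (lows.length : Int) - offset ≤ offset + start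
  · rw [if_pos hempty, PySem.List.pyRange_one_eq_nil hempty]
    rfl
  · push Not at hempty
    rw [if_neg (by omega)]
    rw [PySem.List.pyRange_one_cons hempty]
    by_cases hw : offset - start ≤ 0
    · rw [if_pos hw]
      simp only [aLoop, aInner,
        PySem.List.pyRange_one_eq_nil (by omega : offset ≤ start)]
      rw [if_pos trivial]
    · rw [if_neg hw]
      push Not at hw
      have hns : 0 ≤ offset ∧ 0 ≤ start := by
        rcases hpre with h | h | h
        · exact h
        · omega
        · omega
      obtain ⟨hK1, hK2⟩ := bCalcK_spec (offset - start) 0 (by rw [pow_zero]; omega)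
      rw [← PySem.List.pyRange_one_cons hempty,
        loops_eq lows (bBuild lows (bCalcK (offset - start) 0)) (offset - start)
          (2 ^ bCalcK (offset - start) 0) offset start _ ?_]
      intro i hi
      rw [PySem.List.mem_pyRange_one] at hi
      exact cond_iff lows offset start i (bCalcK (offset - start) 0)
        hns.2 hw hK1 (by omega) hi.1 hi.2
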